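-- pv_equiv track=rewrite | github.com/Vineyardcode/voynich_slop | scripts/phase57_bax_test.py | compute_positional_profile
-- ===== SOURCE A (Python) =====
-- def compute_positional_profile(words, char_list):
--     """For each character, compute fraction of occurrences at word start/end/middle."""
--     profiles = {}
--     for c in char_list:
--         positions = {'start': 0, 'end': 0, 'middle': 0, 'total': 0}
--         for w in words:
--             for i, ch in enumerate(w):
--                 if ch == c:
--                     positions['total'] += 1
--                     if i == 0:
--                         positions['start'] += 1
--                     elif i == len(w) - 1:
--                         positions['end'] += 1
--                     else:
--                         positions['middle'] += 1
--         profiles[c] = positions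
--     return profiles
-- ===== SOURCE B (Python) =====
-- def compute_positional_profile(words, char_list):
--     """For each character, compute fraction of occurrences at word start/end/middle."""
--     counts = {}
--     for w in words:
--         last = len(w) - 1
--         for i, ch in enumerate(w):
--             s, e, m, t = counts.get(ch, (0, 0, 0, 0))
--             if i == 0:
--                 counts[ch] = (s + 1, e, m, t + 1)
--             elif i == last:
--                 counts[ch] = (s, e + 1, m, t + 1)
--             else:
--                 counts[ch] = (s, e, m + 1, t + 1)
--     profiles = {}
--     for c in char_list:
--         s, e, m, t = counts.get(c, (0, 0, 0, 0))
--         profiles[c] = {'start': s, 'end': e, 'middle': m, 'total': t}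
--     return profiles
-- ===== Notes on version B (the rewrite author's own statement) =====
-- stated objective: faster
-- what changed: B makes one pass over all word characters tallying (start,end,middle,total) per character into a dict, then indexes char_list into it, instead of A's rescan of every word for each listed character.
import Mathlib
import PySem

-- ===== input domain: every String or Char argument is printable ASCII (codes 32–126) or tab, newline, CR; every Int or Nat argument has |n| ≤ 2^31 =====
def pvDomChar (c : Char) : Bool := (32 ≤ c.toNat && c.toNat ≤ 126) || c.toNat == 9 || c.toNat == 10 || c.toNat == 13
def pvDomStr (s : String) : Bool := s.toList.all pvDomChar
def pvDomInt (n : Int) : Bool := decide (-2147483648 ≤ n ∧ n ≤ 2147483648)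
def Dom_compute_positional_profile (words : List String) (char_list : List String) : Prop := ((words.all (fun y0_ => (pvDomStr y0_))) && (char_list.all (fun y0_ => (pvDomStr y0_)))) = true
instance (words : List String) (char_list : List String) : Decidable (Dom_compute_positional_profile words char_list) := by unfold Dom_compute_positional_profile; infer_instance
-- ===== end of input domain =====

-- B tallies per-character (start, end, middle, total) counts in ONE pass over all word characters
-- and then merely indexes char_list into that dict, instead of A's full rescan of every word for each
-- listed character (objective: faster, asymptotically fewer character visits).

-- ===== PORT A =====
-- the dict literal {'start': s, 'end': e, 'middle': m, 'total': t}
def pvMkPos (s e m t : Int) : PySem.Dict String Int :=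
  PySem.Dict.ofList [("start", s), ("end", e), ("middle", m), ("total", t)]

-- A's inner loops for one character c: positions after scanning all words
def pvPosA (words : List String) (c : String) : PySem.Dict String Int :=
  words.foldl (fun positions w =>
    (PySem.List.enumerate w.toList 0).foldl (fun positions p =>
      if [p.2] == c.toList then            -- ch == c (ch is the 1-character string of p.2)
        let positions := positions.modify "total" 0 (· + 1)
        if p.1 == 0 then positions.modify "start" 0 (· + 1)
        else if p.1 == PySem.Str.len w - 1 then positions.modify "end" 0 (· + 1)
        else positions.modify "middle" 0 (· + 1)
      else positions) positions)
    (pvMkPos 0 0 0 0)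

def compute_positional_profile (words : List String) (char_list : List String) :
    List (String × List (String × Int)) :=
  (char_list.foldl (fun profiles c => profiles.insert c (pvPosA words c))
      PySem.Dict.empty).items.map (fun q => (q.1, q.2.items))

-- ===== PORT B =====
-- the tuple update for one occurrence at index i of a word whose last index is `last`
def pvTupStep (last : Int) (a : Int × Int × Int × Int) (i : Int) : Int × Int × Int × Int :=
  if i == 0 then (a.1 + 1, a.2.1, a.2.2.1, a.2.2.2 + 1)
  else if i == last then (a.1, a.2.1 + 1, a.2.2.1, a.2.2.2 + 1)
  else (a.1, a.2.1, a.2.2.1 + 1, a.2.2.2 + 1)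

-- one pass over one word: counts[ch] = updated tuple (modify = get-with-default then store)
def pvTally (counts : PySem.Dict Char (Int × Int × Int × Int)) (w : String) :
    PySem.Dict Char (Int × Int × Int × Int) :=
  (PySem.List.enumerate w.toList 0).foldl
    (fun counts p => counts.modify p.2 (0, 0, 0, 0) (fun a => pvTupStep (PySem.Str.len w - 1) a p.1))
    counts

-- counts.get(c, (0,0,0,0)): keys are single characters, so a key matches the string c
-- exactly when c consists of that one character
def pvGetCounts (counts : PySem.Dict Char (Int × Int × Int × Int)) (c : String) :
    Int × Int × Int × Int :=
  match c.toList with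
  | [ch] => counts.getD ch (0, 0, 0, 0)
  | _ => (0, 0, 0, 0)

def compute_positional_profile_alt (words : List String) (char_list : List String) :
    List (String × List (String × Int)) :=
  let counts := words.foldl pvTally PySem.Dict.empty
  (char_list.foldl (fun profiles c =>
      let a := pvGetCounts counts c
      profiles.insert c (pvMkPos a.1 a.2.1 a.2.2.1 a.2.2.2))
    PySem.Dict.empty).items.map (fun q => (q.1, q.2.items))

-- ===== PRECONDITION & SPEC =====
def Spec_compute_positional_profile (words : List String) (char_list : List String) (out : List (String × List (String × Int))) : Prop := out = compute_positional_profile_alt words char_list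
instance (words : List String) (char_list : List String) (out : List (String × List (String × Int))) : Decidable (Spec_compute_positional_profile words char_list out) := by unfold Spec_compute_positional_profile; infer_instance

-- ===== CLAIM (what is proved, stated in full; the proofs are below) =====
def Claim_equal_compute_positional_profile : Prop := ∀ (words : List String) (char_list : List String), Dom_compute_positional_profile words char_list → Spec_compute_positional_profile words char_list (compute_positional_profile words char_list)

-- ===== LEMMAS AND PROOFS =====

-- A's in-place updates on the positions dict literal, tuple by tuple (all definitional)
theorem pvMkPos_total (s e m t : Int) (f : Int → Int) :
    (pvMkPos s e m t).modify "total" 0 f = pvMkPos s e m (f t) := rfl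
theorem pvMkPos_start (s e m t : Int) (f : Int → Int) :
    (pvMkPos s e m t).modify "start" 0 f = pvMkPos (f s) e m t := rfl
theorem pvMkPos_end (s e m t : Int) (f : Int → Int) :
    (pvMkPos s e m t).modify "end" 0 f = pvMkPos s (f e) m t := rfl
theorem pvMkPos_middle (s e m t : Int) (f : Int → Int) :
    (pvMkPos s e m t).modify "middle" 0 f = pvMkPos s e (f m) t := rfl

def pvMk4 (a : Int × Int × Int × Int) : PySem.Dict String Int :=
  pvMkPos a.1 a.2.1 a.2.2.1 a.2.2.2

-- the pure (tuple-level) reference count of character cl over one word / over all words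
def pvWordTup (cl : List Char) (n : Int) (a : Int × Int × Int × Int) (l : List (Int × Char)) :
    Int × Int × Int × Int :=
  l.foldl (fun a p => if [p.2] == cl then pvTupStep (n - 1) a p.1 else a) a

def pvRef (words : List String) (cl : List Char) : Int × Int × Int × Int :=
  words.foldl (fun a w => pvWordTup cl (PySem.Str.len w) a (PySem.List.enumerate w.toList 0))
    (0, 0, 0, 0)

-- A's dict-valued inner fold is pvMkPos of the tuple-valued fold
theorem pvPosA_inner (cl : List Char) (n : Int) :
    ∀ (l : List (Int × Char)) (a : Int × Int × Int × Int),
      l.foldl (fun positions p =>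
        if [p.2] == cl then
          let positions := positions.modify "total" 0 (· + 1)
          if p.1 == 0 then positions.modify "start" 0 (· + 1)
          else if p.1 == n - 1 then positions.modify "end" 0 (· + 1)
          else positions.modify "middle" 0 (· + 1)
        else positions) (pvMk4 a)
      = pvMk4 (pvWordTup cl n a l) := by
  intro l
  induction l with
  | nil => intro a; rfl
  | cons p l ih =>
    intro a
    obtain ⟨s, e, m, t⟩ := a
    simp only [pvWordTup, List.foldl_cons] at *
    cases hc : ([p.2] == cl) with
    | false =>
      simpa [hc] using ih (s, e, m, t)
    | true =>
      cases h0 : (p.1 == 0) with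
      | true =>
        simpa [hc, h0, pvTupStep, pvMk4, pvMkPos_total, pvMkPos_start] using ih (s + 1, e, m, t + 1)
      | false =>
        cases he : (p.1 == n - 1) with
        | true =>
          simpa [hc, h0, he, pvTupStep, pvMk4, pvMkPos_total, pvMkPos_end] using ih (s, e + 1, m, t + 1)
        | false =>
          simpa [hc, h0, he, pvTupStep, pvMk4, pvMkPos_total, pvMkPos_middle] using ih (s, e, m + 1, t + 1)

theorem pvPosA_outer (c : String) :
    ∀ (words : List String) (a : Int × Int × Int × Int),
      words.foldl (fun positions w =>
        (PySem.List.enumerate w.toList 0).foldl (fun positions p =>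
          if [p.2] == c.toList then
            let positions := positions.modify "total" 0 (· + 1)
            if p.1 == 0 then positions.modify "start" 0 (· + 1)
            else if p.1 == PySem.Str.len w - 1 then positions.modify "end" 0 (· + 1)
            else positions.modify "middle" 0 (· + 1)
          else positions) positions) (pvMk4 a)
      = pvMk4 (words.foldl
          (fun a w => pvWordTup c.toList (PySem.Str.len w) a (PySem.List.enumerate w.toList 0)) a) := by
  intro words
  induction words with
  | nil => intro a; rfl
  | cons w ws ih =>
    intro a
    simp only [List.foldl_cons]
    rw [pvPosA_inner c.toList (PySem.Str.len w) (PySem.List.enumerate w.toList 0) a]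
    exact ih _

theorem pvPosA_eq (words : List String) (c : String) :
    pvPosA words c = pvMk4 (pvRef words c.toList) :=
  pvPosA_outer c words (0, 0, 0, 0)

-- B's counter lookup after one word equals the tuple-valued fold restricted to that character
theorem pvTally_getD (ch : Char) (n : Int) :
    ∀ (l : List (Int × Char)) (d : PySem.Dict Char (Int × Int × Int × Int)),
      (l.foldl (fun counts p => counts.modify p.2 (0, 0, 0, 0) (fun a => pvTupStep (n - 1) a p.1)) d).getD ch (0, 0, 0, 0)
      = pvWordTup [ch] n (d.getD ch (0, 0, 0, 0)) l := by
  intro l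
  induction l with
  | nil => intro d; rfl
  | cons p l ih =>
    intro d
    simp only [List.foldl_cons, pvWordTup] at *
    rw [ih]
    by_cases h : p.2 = ch
    · subst h
      rw [PySem.Dict.getD_modify_self]
      simp
    · rw [PySem.Dict.getD_modify_of_ne _ _ _ (fun hh => h hh.symm)]
      have : ([p.2] == [ch]) = false := by simp [h]
      simp [this]

-- B's counter lookup over all words is the reference count
theorem pvCounts_getD (ch : Char) :
    ∀ (words : List String) (d : PySem.Dict Char (Int × Int × Int × Int)),
      (words.foldl pvTally d).getD ch (0, 0, 0, 0)
      = words.foldl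
          (fun a w => pvWordTup [ch] (PySem.Str.len w) a (PySem.List.enumerate w.toList 0))
          (d.getD ch (0, 0, 0, 0)) := by
  intro words
  induction words with
  | nil => intro d; rfl
  | cons w ws ih =>
    intro d
    simp only [List.foldl_cons]
    rw [ih]
    unfold pvTally
    rw [pvTally_getD ch (PySem.Str.len w) (PySem.List.enumerate w.toList 0) d]

-- when cl is not a single character, no 1-character string equals it, so the reference count is 0
theorem pvWordTup_not_single (cl : List Char) (hcl : ∀ ch : Char, [ch] ≠ cl) (n : Int) :
    ∀ (l : List (Int × Char)) (a : Int × Int × Int × Int), pvWordTup cl n a l = a := by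
  intro l
  induction l with
  | nil => intro a; rfl
  | cons p l ih =>
    intro a
    have hpc : ([p.2] == cl) = false := by
      simp only [beq_eq_false_iff_ne]; exact hcl p.2
    simp only [pvWordTup, List.foldl_cons, hpc, Bool.false_eq_true, if_false] at *
    exact ih a

theorem pvRef_not_single (words : List String) (cl : List Char)
    (hcl : ∀ ch : Char, [ch] ≠ cl) : pvRef words cl = (0, 0, 0, 0) := by
  unfold pvRef
  generalize ((0, 0, 0, 0) : Int × Int × Int × Int) = a
  induction words generalizing a with
  | nil => rfl
  | cons w ws ih =>
    rw [List.foldl_cons, pvWordTup_not_single cl hcl]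
    exact ih a

-- the two lookups agree for every string c
theorem pvGetCounts_eq (words : List String) (c : String) :
    pvGetCounts (words.foldl pvTally PySem.Dict.empty) c = pvRef words c.toList := by
  unfold pvGetCounts
  cases hc : c.toList with
  | nil =>
    rw [pvRef_not_single words [] (fun ch => by simp)]
  | cons ch rest =>
    cases rest with
    | nil => exact pvCounts_getD ch words PySem.Dict.empty
    | cons ch2 rest2 =>
      rw [pvRef_not_single words (ch :: ch2 :: rest2) (fun x => by simp)]

-- ===== VERDICT (by name: the statement is the Claim_ definition above) =====
theorem compute_positional_profile_spec : Claim_equal_compute_positional_profile := by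
  intro words char_list _
  show compute_positional_profile words char_list = compute_positional_profile_alt words char_list
  unfold compute_positional_profile compute_positional_profile_alt
  have hfun : (fun (profiles : PySem.Dict String (PySem.Dict String Int)) c =>
        profiles.insert c (pvPosA words c))
      = (fun (profiles : PySem.Dict String (PySem.Dict String Int)) c =>
        let a := pvGetCounts (words.foldl pvTally PySem.Dict.empty) c
        profiles.insert c (pvMkPos a.1 a.2.1 a.2.2.1 a.2.2.2)) := by
    funext pr c
    show pr.insert c (pvPosA words c)
      = pr.insert c (pvMk4 (pvGetCounts (words.foldl pvTally PySem.Dict.empty) c))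
    rw [pvPosA_eq, pvGetCounts_eq]
  rw [hfun]
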